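-- pv_equiv track=rewrite | github.com/Mygthbtool/Arithmetic-Formatter-For-Students | arithmetic formatter.py | arithmetic_arranger
-- ===== SOURCE A (Python) =====
-- def arithmetic_arranger(problems, show_answers= False):
--     # Not more than five problems
--     if len(problems) > 5:
--       return 'Error: Too many problems.'
--
--     top_lines = []
--     bottom_lines = []
--     dash_lines = []
--     result_lines = []
--
--     for problem in problems:
--         convrted_problem = problem.split()
--         first_num = convrted_problem[0]
--         operator = convrted_problem[1]
--         second_num = convrted_problem[2]
--         # Operator must be '+' or '-'
--         if operator == '*' or operator == '/':
--             return "Error: Operator must be '+' or '-'."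
--             break
--
--         # Numbers must only contain digits
--         if not (first_num.isdigit() and second_num.isdigit()):
--             return 'Error: Numbers must only contain digits.'
--             break
--         # Numbers cannot be more than four digits
--         if len(first_num) > 4 or len(second_num) > 4:
--             return 'Error: Numbers cannot be more than four digits.'
--             break
--
--         max_length = max(len(first_num), len(second_num))
--
--         top_line = first_num.rjust(max_length + 2)
--         bottom_line = operator + ' ' + second_num.rjust(max_length)
--         dashes = '-' * (max_length + 2)
--
--         top_lines.append(top_line)
--         bottom_lines.append(bottom_line)
--         dash_lines.append(dashes)
--
--         if show_answers == True:
--             if operator == '+':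
--                 result = int(first_num) + int(second_num)
--             if operator == '-':
--                 result = int(first_num) - int(second_num)
--
--             result_line = (str(result)).rjust(max_length + 2)
--
--             result_lines.append((result_line))
--
--     arranged_problems = '    '.join(top_lines) + "\n" + '    '.join(bottom_lines) + "\n" + '    '.join(dash_lines)
--     if show_answers:
--         arranged_problems += '\n' + '    '.join(result_lines)
--
--     return arranged_problems
-- ===== SOURCE B (Python) =====
-- def arithmetic_arranger(problems, show_answers=False):
--     if len(problems) > 5:
--         return 'Error: Too many problems.'
--     error = _first_error(problems)
--     if error is not None:
--         return error
--     blocks = [_block(p, show_answers) for p in problems]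
--     rows = 4 if show_answers else 3
--     return '\n'.join('    '.join(b[r] for b in blocks) for r in range(rows))
--
-- def _first_error(problems):
--     for p in problems:
--         parts = p.split()
--         a, op, b = parts[0], parts[1], parts[2]
--         if op == '*' or op == '/':
--             return "Error: Operator must be '+' or '-'."
--         if not (a.isdigit() and b.isdigit()):
--             return 'Error: Numbers must only contain digits.'
--         if len(a) > 4 or len(b) > 4:
--             return 'Error: Numbers cannot be more than four digits.'
--     return None
--
-- def _block(p, show_answers):
--     parts = p.split()
--     a, op, b = parts[0], parts[1], parts[2]
--     w = max(len(a), len(b)) + 2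
--     rows = [a.rjust(w), op + ' ' + b.rjust(w - 2), '-' * w]
--     if show_answers:
--         ans = {'+': int(a) + int(b), '-': int(a) - int(b)}[op]
--         rows.append(str(ans).rjust(w))
--     return rows
-- ===== Notes on version B (the rewrite author's own statement) =====
-- stated objective: alternative
-- what changed: A interleaves validation, formatting and answer bookkeeping in one loop over four parallel row accumulators plus a reused loop variable; B is re-decomposed into a validation pass returning the first error, a per-problem column-block builder with a dict dispatch for the answer, and a final row-wise join over the blocks.
import Mathlib
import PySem

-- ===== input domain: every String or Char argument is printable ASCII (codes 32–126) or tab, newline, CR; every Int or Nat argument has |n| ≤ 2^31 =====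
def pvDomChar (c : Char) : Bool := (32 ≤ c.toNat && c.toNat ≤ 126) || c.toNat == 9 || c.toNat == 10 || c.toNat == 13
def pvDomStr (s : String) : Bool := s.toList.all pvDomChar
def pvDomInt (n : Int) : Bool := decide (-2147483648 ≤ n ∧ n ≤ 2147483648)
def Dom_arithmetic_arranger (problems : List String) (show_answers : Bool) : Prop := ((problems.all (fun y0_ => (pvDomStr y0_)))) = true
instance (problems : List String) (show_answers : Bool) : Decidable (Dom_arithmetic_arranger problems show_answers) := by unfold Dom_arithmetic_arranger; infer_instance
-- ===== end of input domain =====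

-- B re-decomposes A: one validation pass returning the first error, then per-problem column
-- blocks, then row-wise joins; same return value on Pre_ (alternative decomposition, no speed
-- claim).  Both ports go through List Char (PySem.Chars) and wrap with String.ofList.

-- Python's str.rjust(w) with the default space fill (helper used by both ports)
def pvRjust (s : List Char) (w : Nat) : List Char := List.replicate (w - s.length) ' ' ++ s

-- ===== PORT A =====
-- the loop over problems, carrying the four accumulator lists and the loop-local variable
-- `result` (none = not yet assigned; Python's NameError on use is excluded by Pre_)
def aLoop (show_answers : Bool) :
    List String → List (List Char) → List (List Char) → List (List Char) → List (List Char) →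
    Option Int → String
  | [], top_lines, bottom_lines, dash_lines, result_lines, _ =>
      let arranged := PySem.Chars.join "    ".toList top_lines ++ "\n".toList ++
        PySem.Chars.join "    ".toList bottom_lines ++ "\n".toList ++
        PySem.Chars.join "    ".toList dash_lines
      if show_answers then
        String.ofList (arranged ++ "\n".toList ++ PySem.Chars.join "    ".toList result_lines)
      else String.ofList arranged
  | problem :: rest, top_lines, bottom_lines, dash_lines, result_lines, result =>
      let converted := PySem.Chars.split₀ problem.toList
      let first_num := converted.getD 0 []   -- IndexError on fewer than 3 tokens: excluded by Pre_
      let operator := converted.getD 1 []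
      let second_num := converted.getD 2 []
      if operator == ['*'] || operator == ['/'] then "Error: Operator must be '+' or '-'."
      else if !(PySem.Chars.strIsdigit first_num && PySem.Chars.strIsdigit second_num) then
        "Error: Numbers must only contain digits."
      else if 4 < first_num.length || 4 < second_num.length then
        "Error: Numbers cannot be more than four digits."
      else
        let max_length := max first_num.length second_num.length
        let top_line := pvRjust first_num (max_length + 2)
        let bottom_line := operator ++ [' '] ++ pvRjust second_num max_length
        let dashes := List.replicate (max_length + 2) '-'
        if show_answers then
          let result := if operator == ['+'] then
            some ((PySem.Int.ofChars? first_num).getD 0 + (PySem.Int.ofChars? second_num).getD 0)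
            else result
          let result := if operator == ['-'] then
            some ((PySem.Int.ofChars? first_num).getD 0 - (PySem.Int.ofChars? second_num).getD 0)
            else result
          -- `result.getD 0`: `result = none` here is Python's NameError, excluded by Pre_
          let result_line := pvRjust (PySem.Int.toChars (result.getD 0)) (max_length + 2)
          aLoop show_answers rest (top_lines ++ [top_line]) (bottom_lines ++ [bottom_line])
            (dash_lines ++ [dashes]) (result_lines ++ [result_line]) result
        else
          aLoop show_answers rest (top_lines ++ [top_line]) (bottom_lines ++ [bottom_line])
            (dash_lines ++ [dashes]) result_lines result

def arithmetic_arranger (problems : List String) (show_answers : Bool) : String :=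
  if 5 < problems.length then "Error: Too many problems."
  else aLoop show_answers problems [] [] [] [] none

-- ===== PORT B =====
-- validation pass: the first error, in A's per-problem check order, or none
def pvFirstError : List String → Option String
  | [] => none
  | p :: rest =>
      let parts := PySem.Chars.split₀ p.toList
      let a := parts.getD 0 []   -- IndexError on fewer than 3 tokens: excluded by Pre_
      let op := parts.getD 1 []
      let b := parts.getD 2 []
      if op == ['*'] || op == ['/'] then some "Error: Operator must be '+' or '-'."
      else if !(PySem.Chars.strIsdigit a && PySem.Chars.strIsdigit b) then
        some "Error: Numbers must only contain digits."
      else if 4 < a.length || 4 < b.length then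
        some "Error: Numbers cannot be more than four digits."
      else pvFirstError rest

-- one problem's column block: top, bottom, dash and (with answers) result row
def pvBlock (show_answers : Bool) (p : String) : List (List Char) :=
  let parts := PySem.Chars.split₀ p.toList
  let a := parts.getD 0 []
  let op := parts.getD 1 []
  let b := parts.getD 2 []
  let w := max a.length b.length + 2
  let rows := [pvRjust a w, op ++ [' '] ++ pvRjust b (w - 2), List.replicate w '-']
  if show_answers then
    let table : PySem.Dict (List Char) Int :=
      PySem.Dict.ofList [(['+'], (PySem.Int.ofChars? a).getD 0 + (PySem.Int.ofChars? b).getD 0),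
                         (['-'], (PySem.Int.ofChars? a).getD 0 - (PySem.Int.ofChars? b).getD 0)]
    -- KeyError for an operator other than '+'/'-' is excluded by Pre_
    let ans := (table.get? op).getD 0
    rows ++ [pvRjust (PySem.Int.toChars ans) w]
  else rows

def arithmetic_arranger_alt (problems : List String) (show_answers : Bool) : String :=
  if 5 < problems.length then "Error: Too many problems."
  else
    match pvFirstError problems with
    | some e => e
    | none =>
      let blocks := problems.map (pvBlock show_answers)
      let rows := if show_answers then 4 else 3
      String.ofList (PySem.Chars.join "\n".toList ((List.range rows).map
        (fun r => PySem.Chars.join "    ".toList (blocks.map (fun b => b.getD r [])))))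

-- ===== PRECONDITION & SPEC =====
-- input-shape predicates used by Pre_/D_ (checks on the input only)
def pvProbOk (p : String) : Bool :=
  let t := PySem.Chars.split₀ p.toList
  3 ≤ t.length && !(t.getD 1 [] == ['*'] || t.getD 1 [] == ['/']) &&
    (PySem.Chars.strIsdigit (t.getD 0 []) && PySem.Chars.strIsdigit (t.getD 2 [])) &&
    !(4 < (t.getD 0 []).length || 4 < (t.getD 2 []).length)

-- the operator token (second whitespace token) of a problem, [] if there is none
def pvOperatorTok (p : String) : List Char :=
  match PySem.Chars.split₀ p.toList with
  | _ :: op :: _ => op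
  | _ => []

def pvAnsOp (p : String) : Bool := [['+'], ['-']].contains (pvOperatorTok p)

-- Pre_ excludes the inputs on which a program raises (see the cite in claim.json for the one kind where A still returns):
-- a problem with fewer than three whitespace tokens reached as the first invalid one
-- (IndexError in both), show_answers=True with a valid first problem whose operator is neither
-- '+' nor '-' (A: UnboundLocalError on `result`; B: KeyError), and show_answers=True with all
-- problems valid but a LATER operator neither '+' nor '-': there A returns the previous
-- problem's `result` under that column while B raises KeyError.
def Pre_arithmetic_arranger (problems : List String) (show_answers : Bool) : Prop :=
  5 < problems.length ∨
  ((problems.dropWhile pvProbOk ≠ [] →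
      3 ≤ (PySem.Chars.split₀ ((problems.dropWhile pvProbOk).headD "").toList).length) ∧
   (show_answers = true →
      (pvProbOk (problems.headD "") = true → pvAnsOp (problems.headD "") = true) ∧
      (problems.all pvProbOk = true → problems.all pvAnsOp = true)))
instance (problems : List String) (show_answers : Bool) : Decidable (Pre_arithmetic_arranger problems show_answers) := by unfold Pre_arithmetic_arranger; infer_instance

def pvWitness_arithmetic_arranger : List String × Bool := (["32 + 698", "1 - 3800"], true)


def Spec_arithmetic_arranger (problems : List String) (show_answers : Bool) (out : String) : Prop := out = arithmetic_arranger_alt problems show_answers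
instance (problems : List String) (show_answers : Bool) (out : String) : Decidable (Spec_arithmetic_arranger problems show_answers out) := by unfold Spec_arithmetic_arranger; infer_instance



-- ===== CLAIM (what is proved, stated in full; the proofs are below) =====
def Claim_equal_arithmetic_arranger : Prop := ∀ (problems : List String) (show_answers : Bool), Dom_arithmetic_arranger problems show_answers → Pre_arithmetic_arranger problems show_answers → Spec_arithmetic_arranger problems show_answers (arithmetic_arranger problems show_answers)

-- ===== LEMMAS AND PROOFS =====

-- the rows B's block r-extraction produces for one problem
def pvRowTop (p : String) : List Char :=
  let t := PySem.Chars.split₀ p.toList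
  pvRjust (t.getD 0 []) (max (t.getD 0 []).length (t.getD 2 []).length + 2)
def pvRowBot (p : String) : List Char :=
  let t := PySem.Chars.split₀ p.toList
  t.getD 1 [] ++ [' '] ++ pvRjust (t.getD 2 []) (max (t.getD 0 []).length (t.getD 2 []).length)
def pvRowDash (p : String) : List Char :=
  let t := PySem.Chars.split₀ p.toList
  List.replicate (max (t.getD 0 []).length (t.getD 2 []).length + 2) '-'
def pvRowAns (p : String) : List Char :=
  let t := PySem.Chars.split₀ p.toList
  let table : PySem.Dict (List Char) Int :=
    PySem.Dict.ofList [(['+'], (PySem.Int.ofChars? (t.getD 0 [])).getD 0 + (PySem.Int.ofChars? (t.getD 2 [])).getD 0),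
                       (['-'], (PySem.Int.ofChars? (t.getD 0 [])).getD 0 - (PySem.Int.ofChars? (t.getD 2 [])).getD 0)]
  pvRjust (PySem.Int.toChars ((table.get? (t.getD 1 [])).getD 0))
    (max (t.getD 0 []).length (t.getD 2 []).length + 2)

lemma dict_get_plus (x y : Int) :
    (((PySem.Dict.ofList [(['+'], x), (['-'], y)] : PySem.Dict (List Char) Int)).get? ['+']).getD 0 = x := rfl
lemma dict_get_minus (x y : Int) :
    (((PySem.Dict.ofList [(['+'], x), (['-'], y)] : PySem.Dict (List Char) Int)).get? ['-']).getD 0 = y := rfl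

-- what aLoop returns once it has consumed all problems
def pvRender (show_answers : Bool) (tops bots dashes results : List (List Char)) : String :=
  let arranged := PySem.Chars.join "    ".toList tops ++ "\n".toList ++
    PySem.Chars.join "    ".toList bots ++ "\n".toList ++
    PySem.Chars.join "    ".toList dashes
  if show_answers then
    String.ofList (arranged ++ "\n".toList ++ PySem.Chars.join "    ".toList results)
  else String.ofList arranged

lemma pvBlock_getD (show_answers : Bool) (p : String) :
    (pvBlock show_answers p).getD 0 [] = pvRowTop p ∧
    (pvBlock show_answers p).getD 1 [] = pvRowBot p ∧
    (pvBlock show_answers p).getD 2 [] = pvRowDash p ∧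
    (show_answers = true → (pvBlock show_answers p).getD 3 [] = pvRowAns p) := by
  cases show_answers <;>
    simp [pvBlock, pvRowTop, pvRowBot, pvRowDash, pvRowAns, List.getD]

lemma pvAnsOp_iff (p : String) :
    pvAnsOp p = true ↔
      (PySem.Chars.split₀ p.toList).getD 1 [] = ['+'] ∨
        (PySem.Chars.split₀ p.toList).getD 1 [] = ['-'] := by
  unfold pvAnsOp pvOperatorTok
  match PySem.Chars.split₀ p.toList with
  | [] => simp
  | [_] => simp
  | _ :: op :: _ => simp [List.getD]

-- if validation finds an error, A's loop returns that same error whatever its accumulators hold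
lemma aLoop_error (show_answers : Bool) (e : String) :
    ∀ (rest : List String) (tops bots dashes results : List (List Char)) (res : Option Int),
      pvFirstError rest = some e →
      aLoop show_answers rest tops bots dashes results res = e := by
  intro rest
  induction rest with
  | nil => intro _ _ _ _ _ h; simp [pvFirstError] at h
  | cons p rest ih =>
    intro tops bots dashes results res h
    simp only [pvFirstError] at h
    simp only [aLoop]
    split_ifs at h ⊢ <;> first
      | exact Option.some.inj h
      | exact ih _ _ _ _ _ h

-- a problem that passes all three of the loop's checks satisfies pvProbOk
lemma checks_ok (p : String)
    (h1 : ¬ ((PySem.Chars.split₀ p.toList).getD 1 [] == ['*'] || (PySem.Chars.split₀ p.toList).getD 1 [] == ['/']) = true)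
    (h2 : ¬ (!(PySem.Chars.strIsdigit ((PySem.Chars.split₀ p.toList).getD 0 []) && PySem.Chars.strIsdigit ((PySem.Chars.split₀ p.toList).getD 2 []))) = true)
    (h3 : ¬ (4 < ((PySem.Chars.split₀ p.toList).getD 0 []).length || 4 < ((PySem.Chars.split₀ p.toList).getD 2 []).length) = true) :
    pvProbOk p = true := by
  have hb : PySem.Chars.strIsdigit ((PySem.Chars.split₀ p.toList).getD 2 []) = true := by
    simp only [Bool.not_eq_true, Bool.not_eq_false', Bool.and_eq_true] at h2
    exact h2.2
  -- the third token is a nonempty digit string, so there are at least 3 tokens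
  have hlen3 : 3 ≤ (PySem.Chars.split₀ p.toList).length := by
    by_contra hlt
    rw [List.getD_eq_default _ _ (by omega)] at hb
    exact absurd hb (by decide)
  simp only [pvProbOk, Bool.and_eq_true]
  refine ⟨⟨⟨by simpa using hlen3, by simpa using h1⟩, by simpa using h2⟩, by simpa using h3⟩

lemma firstError_none_all_ok : ∀ (problems : List String),
    pvFirstError problems = none → problems.all pvProbOk = true := by
  intro problems
  induction problems with
  | nil => intro _; rfl
  | cons p rest ih =>
    intro h
    simp only [pvFirstError] at h
    split_ifs at h with h1 h2 h3
    simp only [List.all_cons, Bool.and_eq_true]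
    exact ⟨checks_ok p h1 h2 h3, ih h⟩

-- with no error ahead and (under show_answers) only '+'/'-' operators ahead, A's loop renders
-- exactly the accumulated rows followed by each remaining problem's block rows
lemma aLoop_ok (show_answers : Bool) :
    ∀ (rest : List String) (tops bots dashes results : List (List Char)) (res : Option Int),
      pvFirstError rest = none →
      (show_answers = true → rest.all pvAnsOp = true) →
      aLoop show_answers rest tops bots dashes results res =
        pvRender show_answers (tops ++ rest.map pvRowTop) (bots ++ rest.map pvRowBot)
          (dashes ++ rest.map pvRowDash)
          (results ++ if show_answers then rest.map pvRowAns else []) := by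
  intro rest
  induction rest with
  | nil =>
    intro tops bots dashes results res _ _
    cases show_answers <;> simp [aLoop, pvRender]
  | cons p rest ih =>
    intro tops bots dashes results res h hops
    simp only [pvFirstError] at h
    simp only [aLoop]
    split_ifs at h with h1 h2 h3
    rw [if_neg h1, if_neg h2, if_neg h3]
    cases show_answers with
    | false =>
      simp only [Bool.false_eq_true, if_false]
      rw [ih _ _ _ _ _ h (by simp)]
      simp [pvRowTop, pvRowBot, pvRowDash]
    | true =>
      simp only [if_true]
      have hops' := hops rfl
      simp only [List.all_cons, Bool.and_eq_true] at hops'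
      have hp := (pvAnsOp_iff p).mp hops'.1
      rw [ih _ _ _ _ _ h (fun _ => hops'.2)]
      rcases hp with hp | hp
      · -- operator '+'
        have hp' : (PySem.Chars.split₀ p.toList)[1]?.getD [] = ['+'] := by
          simpa [List.getD] using hp
        simp [pvRowTop, pvRowBot, pvRowDash, pvRowAns, hp', dict_get_plus]
      · -- operator '-'
        have hp' : (PySem.Chars.split₀ p.toList)[1]?.getD [] = ['-'] := by
          simpa [List.getD] using hp
        simp [pvRowTop, pvRowBot, pvRowDash, pvRowAns, hp', dict_get_minus]

-- B's row-join output is pvRender of the per-problem rows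
lemma alt_render (problems : List String) (show_answers : Bool) :
    String.ofList (PySem.Chars.join "\n".toList ((List.range (if show_answers then 4 else 3)).map
        (fun r => PySem.Chars.join "    ".toList
          ((problems.map (pvBlock show_answers)).map (fun b => b.getD r []))))) =
      pvRender show_answers (problems.map pvRowTop) (problems.map pvRowBot)
        (problems.map pvRowDash) (if show_answers then problems.map pvRowAns else []) := by
  have hmap : ∀ (r : Nat) (f : String → List Char),
      (∀ p, (pvBlock show_answers p).getD r [] = f p) →
      (problems.map (pvBlock show_answers)).map (fun b => b.getD r []) = problems.map f := by
    intro r f hf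
    rw [List.map_map]
    exact List.map_congr_left (fun p _ => hf p)
  cases show_answers with
  | false =>
    simp only [Bool.false_eq_true, if_false, List.range_succ, List.range_zero,
      List.nil_append, List.map_cons, List.map_nil, List.cons_append]
    rw [hmap 0 pvRowTop (fun p => (pvBlock_getD false p).1),
        hmap 1 pvRowBot (fun p => (pvBlock_getD false p).2.1),
        hmap 2 pvRowDash (fun p => (pvBlock_getD false p).2.2.1)]
    simp [pvRender, PySem.Chars.join, List.intercalate, String.ofList_append]
  | true =>
    simp only [if_true, List.range_succ, List.range_zero,
      List.nil_append, List.map_cons, List.map_nil, List.cons_append]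
    rw [hmap 0 pvRowTop (fun p => (pvBlock_getD true p).1),
        hmap 1 pvRowBot (fun p => (pvBlock_getD true p).2.1),
        hmap 2 pvRowDash (fun p => (pvBlock_getD true p).2.2.1),
        hmap 3 pvRowAns (fun p => (pvBlock_getD true p).2.2.2 rfl)]
    simp [pvRender, PySem.Chars.join, List.intercalate, String.ofList_append]

lemma all_ansOp (problems : List String) (show_answers : Bool)
    (hpre : Pre_arithmetic_arranger problems show_answers)
    (hlen : ¬ 5 < problems.length)
    (hok : problems.all pvProbOk = true)
    (hshow : show_answers = true) : problems.all pvAnsOp = true := by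
  rcases hpre with hpre | ⟨_, hpre⟩
  · omega
  · exact (hpre hshow).2 hok

-- ===== VERDICT (by name: the statement is the Claim_ definition above) =====
theorem arithmetic_arranger_spec : Claim_equal_arithmetic_arranger := by
  intro problems show_answers _ hpre
  unfold Spec_arithmetic_arranger arithmetic_arranger arithmetic_arranger_alt
  by_cases hlen : 5 < problems.length
  · rw [if_pos hlen, if_pos hlen]
  rw [if_neg hlen, if_neg hlen]
  cases he : pvFirstError problems with
  | some e => exact aLoop_error show_answers e problems [] [] [] [] none he
  | none =>
    have hok := firstError_none_all_ok problems he
    have hops : show_answers = true → problems.all pvAnsOp = true := fun hshow =>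
      all_ansOp problems show_answers hpre hlen hok hshow
    rw [aLoop_ok show_answers problems [] [] [] [] none he hops]
    simp only [List.nil_append]
    exact (alt_render problems show_answers).symm
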